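-- pv_equiv track=rewrite | github.com/JaeyoonCheon/Algorithm | BOJ/Bruteforce/18290.py | checkAdj
-- ===== SOURCE A (Python) =====
-- def checkAdj(x, y, visited):
--     for item in visited:
--         if item[0] + 1 == x and item[1] == y:
--             return False
--         if item[0] - 1 == x and item[1] == y:
--             return False
--         if item[0] == x and item[1] + 1 == y:
--             return False
--         if item[0] == x and item[1] - 1 == y:
--             return False
--
--     return True
-- ===== SOURCE B (Python) =====
-- def checkAdj(x, y, visited):
--     s = {(v[0], v[1]) for v in visited}
--     neighbors = [(x - 1, y), (x + 1, y), (x, y - 1), (x, y + 1)]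
--     return all(n not in s for n in neighbors)
-- ===== Notes on version B (the rewrite author's own statement) =====
-- stated objective: idiomatic
-- what changed: Instead of scanning visited with a four-branch body per cell, B indexes visited into a set once and does a fixed 4-element pass over the target's neighbors with membership lookups.
import Mathlib
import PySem

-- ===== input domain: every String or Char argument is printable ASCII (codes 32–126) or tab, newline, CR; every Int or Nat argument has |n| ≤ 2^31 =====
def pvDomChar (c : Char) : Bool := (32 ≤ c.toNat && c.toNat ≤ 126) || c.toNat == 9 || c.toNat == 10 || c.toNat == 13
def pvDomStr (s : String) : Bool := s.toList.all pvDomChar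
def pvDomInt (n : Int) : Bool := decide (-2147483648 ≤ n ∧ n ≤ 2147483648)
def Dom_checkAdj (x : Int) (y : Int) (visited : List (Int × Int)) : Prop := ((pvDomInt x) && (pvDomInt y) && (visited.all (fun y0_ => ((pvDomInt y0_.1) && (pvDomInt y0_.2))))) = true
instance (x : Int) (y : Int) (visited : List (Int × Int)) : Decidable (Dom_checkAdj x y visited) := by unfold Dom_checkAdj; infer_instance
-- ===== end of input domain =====

-- B replaces the per-cell four-branch scan of visited with a set of visited cells and a fixed 4-neighbor membership pass (idiomatic; same O(n) cost).


-- ===== PORT A =====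
-- A: scan visited; return False on the first orthogonally-adjacent cell, else True.
def checkAdj (x : Int) (y : Int) (visited : List (Int × Int)) : Bool :=
  match visited with
  | [] => true
  | item :: rest =>
    if item.1 + 1 == x && item.2 == y then false
    else if item.1 - 1 == x && item.2 == y then false
    else if item.1 == x && item.2 + 1 == y then false
    else if item.1 == x && item.2 - 1 == y then false
    else checkAdj x y rest

-- ===== PORT B =====
-- B: index visited into a set once, then a fixed 4-element pass over the neighbors.
def checkAdj_alt (x : Int) (y : Int) (visited : List (Int × Int)) : Bool :=
  let s : PySem.Set (Int × Int) := PySem.Set.ofList (visited.map (fun v => (v.1, v.2)))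
  let neighbors : List (Int × Int) := [(x - 1, y), (x + 1, y), (x, y - 1), (x, y + 1)]
  neighbors.all (fun n => !(PySem.Set.contains s n))

-- ===== PRECONDITION & SPEC =====
def Spec_checkAdj (x : Int) (y : Int) (visited : List (Int × Int)) (out : Bool) : Prop := out = checkAdj_alt x y visited
instance (x : Int) (y : Int) (visited : List (Int × Int)) (out : Bool) : Decidable (Spec_checkAdj x y visited out) := by unfold Spec_checkAdj; infer_instance

-- ===== CLAIM (what is proved, stated in full; the proofs are below) =====
def Claim_equal_checkAdj : Prop := ∀ (x : Int) (y : Int) (visited : List (Int × Int)), Dom_checkAdj x y visited → Spec_checkAdj x y visited (checkAdj x y visited)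

-- ===== LEMMAS AND PROOFS =====

-- ===== VERDICT (by name: the statement is the Claim_ definition above) =====
theorem alt_iff (x y : Int) (visited : List (Int × Int)) :
    checkAdj_alt x y visited = true ↔
      ((x-1,y) ∉ visited ∧ (x+1,y) ∉ visited ∧ (x,y-1) ∉ visited ∧ (x,y+1) ∉ visited) := by
  simp [checkAdj_alt, PySem.Set.mem_ofList, List.all_cons]

theorem branch1 (x y : Int) (item : Int × Int) :
    (item.1 + 1 == x && item.2 == y) = true ↔ item = (x - 1, y) := by
  simp [Prod.ext_iff]; omega

theorem branch2 (x y : Int) (item : Int × Int) :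
    (item.1 - 1 == x && item.2 == y) = true ↔ item = (x + 1, y) := by
  simp [Prod.ext_iff]; omega

theorem branch3 (x y : Int) (item : Int × Int) :
    (item.1 == x && item.2 + 1 == y) = true ↔ item = (x, y - 1) := by
  simp [Prod.ext_iff]; omega

theorem branch4 (x y : Int) (item : Int × Int) :
    (item.1 == x && item.2 - 1 == y) = true ↔ item = (x, y + 1) := by
  simp [Prod.ext_iff]; omega

theorem a_iff (x y : Int) (visited : List (Int × Int)) :
    checkAdj x y visited = true ↔
      ((x-1,y) ∉ visited ∧ (x+1,y) ∉ visited ∧ (x,y-1) ∉ visited ∧ (x,y+1) ∉ visited) := by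
  induction visited with
  | nil => simp [checkAdj]
  | cons item rest ih =>
    simp only [checkAdj, List.mem_cons]
    split_ifs with h1 h2 h3 h4
    · rw [branch1 x y item] at h1
      simp only [false_iff]
      intro ⟨hc, _, _, _⟩; exact hc (Or.inl h1.symm)
    · rw [branch2 x y item] at h2
      simp only [false_iff]
      intro ⟨_, hc, _, _⟩; exact hc (Or.inl h2.symm)
    · rw [branch3 x y item] at h3
      simp only [false_iff]
      intro ⟨_, _, hc, _⟩; exact hc (Or.inl h3.symm)
    · rw [branch4 x y item] at h4
      simp only [false_iff]
      intro ⟨_, _, _, hc⟩; exact hc (Or.inl h4.symm)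
    · rw [ih]
      rw [branch1 x y item] at h1
      rw [branch2 x y item] at h2
      rw [branch3 x y item] at h3
      rw [branch4 x y item] at h4
      constructor
      · rintro ⟨a, b, c, d⟩
        exact ⟨fun h => h.elim (fun h => h1 h.symm) a,
               fun h => h.elim (fun h => h2 h.symm) b,
               fun h => h.elim (fun h => h3 h.symm) c,
               fun h => h.elim (fun h => h4 h.symm) d⟩
      · rintro ⟨a, b, c, d⟩
        exact ⟨fun h => a (Or.inr h), fun h => b (Or.inr h),
               fun h => c (Or.inr h), fun h => d (Or.inr h)⟩

theorem checkAdj_spec : Claim_equal_checkAdj := by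
  intro x y visited _
  unfold Spec_checkAdj
  rcases hb : checkAdj_alt x y visited with _ | _
  · rcases ha : checkAdj x y visited with _ | _
    · rfl
    · exact absurd ((alt_iff x y visited).mpr ((a_iff x y visited).mp ha)) (by simp [hb])
  · exact (a_iff x y visited).mpr ((alt_iff x y visited).mp hb)
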